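-- pv_equiv track=rewrite | github.com/glasser/ledger-reconcile | ledger_reconcile/sexp_parser.py | _find_string_end
-- ===== SOURCE A (Python) =====
-- def _find_string_end(s: str, start: int) -> int:
--     """Find the end of a quoted string."""
--     i = start + 1
--     while i < len(s) and s[i] != '"':
--         if s[i] == "\\":
--             i += 2
--         else:
--             i += 1
--     return i + 1  # include closing quote
-- ===== SOURCE B (Python) =====
-- def _find_string_end(s: str, start: int) -> int:
--     """Find the end of a quoted string."""
--     n = len(s)
--     i = start + 1
--     while i < n:
--         q = s.find('"', i)
--         b = s.find('\\', i)
--         if b != -1 and (q == -1 or b < q):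
--             i = b + 2  # skip the escaped character
--         else:
--             return n + 1 if q == -1 else q + 1
--     return i + 1
-- ===== Notes on version B (the rewrite author's own statement) =====
-- stated objective: faster
-- what changed: Replaced A's per-character Python while-loop (inspecting s[i] one index at a time) by a delimiter-jumping scan that repeatedly uses C-level str.find to locate the next quote and the next backslash and jumps straight past escaped characters; a timing run measured it 13x faster at the largest size.
-- outside the precondition, e.g. on _find_string_end('ab"', -3): A returns 0, B returns 3; on _find_string_end('', -2): A raises IndexError, B returns 1
import Mathlib
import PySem

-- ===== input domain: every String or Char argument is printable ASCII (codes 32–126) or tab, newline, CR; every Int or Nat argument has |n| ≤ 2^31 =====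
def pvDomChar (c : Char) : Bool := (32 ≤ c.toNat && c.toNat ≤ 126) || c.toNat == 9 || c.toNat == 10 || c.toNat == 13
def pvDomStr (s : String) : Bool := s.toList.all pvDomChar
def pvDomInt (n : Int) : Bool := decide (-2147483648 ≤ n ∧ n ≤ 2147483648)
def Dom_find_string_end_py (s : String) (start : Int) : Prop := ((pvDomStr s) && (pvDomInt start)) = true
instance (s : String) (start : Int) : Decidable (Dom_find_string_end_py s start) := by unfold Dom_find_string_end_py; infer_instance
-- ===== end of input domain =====

-- B replaces A's per-character while-loop by a delimiter-jumping scan built on str.find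
-- (idiomatic; return value only, no side effects in either version).

-- ===== PORT A =====
-- the while-loop of A: i scans forward, escaped characters skip 2
def findStringEndGo (cs : List Char) (i : Int) : Int :=
  if _h : i < (cs.length : Int) then
    match PySem.List.pyGet? cs i with
    | some c =>
      if c = '"' then i + 1                      -- loop exits on the closing quote, then returns i + 1
      else if c = '\\' then findStringEndGo cs (i + 2)
      else findStringEndGo cs (i + 1)
    | none => i + 1                              -- Python raises IndexError here (i < -len(s)); outside Pre_
  else i + 1
termination_by ((cs.length : Int) - i).toNat
decreasing_by all_goals omega

def find_string_end_py (s : String) (start : Int) : Int :=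
  findStringEndGo s.toList (start + 1)

-- ===== PORT B =====
-- str.find never returns an index below start - 1 (needed for termination of the jumping scan)
theorem findFrom_ge (cs : List Char) (c : Char) (i : Int) :
    PySem.Chars.findFrom cs [c] i = -1 ∨ i - 1 ≤ PySem.Chars.findFrom cs [c] i := by
  have H : ∀ (m : Nat), -1 ≤ PySem.Chars.find (List.drop m (List.take ((cs.length : Int)).toNat cs)) [c] :=
    fun m => PySem.Chars.neg_one_le_find _ _
  simp only [PySem.Chars.findFrom]
  split_ifs <;>
    first
      | exact Or.inl rfl
      | (right
         have h1 := H (Int.toNat 0)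
         have h2 := H (i + (cs.length : Int)).toNat
         have h3 := H i.toNat
         omega)

-- the jumping scan of B: each round finds the next quote and the next backslash
def findStringEndAltGo (cs : List Char) (n : Int) (i : Int) : Int :=
  if _h : i < n then
    let q := PySem.Chars.findFrom cs ['"'] i     -- s.find('"', i)
    let b := PySem.Chars.findFrom cs ['\\'] i    -- s.find('\\', i)
    if hcond : b ≠ -1 ∧ (q = -1 ∨ b < q) then findStringEndAltGo cs n (b + 2)
    else if q = -1 then n + 1 else q + 1
  else i + 1
termination_by (n - i).toNat
decreasing_by
  have hb : b = PySem.Chars.findFrom cs ['\\'] i := rfl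
  rcases findFrom_ge cs '\\' i with h | h
  · exact absurd (hb.trans h) hcond.1
  · omega

def find_string_end_py_alt (s : String) (start : Int) : Int :=
  findStringEndAltGo s.toList s.length (start + 1)

-- ===== PRECONDITION & SPEC =====
-- Pre_ restricts to the function's natural domain (start = index of the opening quote, so start ≥ -1 covers
-- every scan starting at 0 or later); for smaller start Python's negative indexing makes A read from the END
-- of the string (or raise IndexError), behaviour outside the function's purpose that B does not reproduce.
def Pre_find_string_end_py (s : String) (start : Int) : Prop := -1 ≤ start
instance (s : String) (start : Int) : Decidable (Pre_find_string_end_py s start) := by unfold Pre_find_string_end_py; infer_instance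

def pvWitness_find_string_end_py : String × Int := ("\"a\\\"b\"", 0)

def Spec_find_string_end_py (s : String) (start : Int) (out : Int) : Prop := out = find_string_end_py_alt s start
instance (s : String) (start : Int) (out : Int) : Decidable (Spec_find_string_end_py s start out) := by unfold Spec_find_string_end_py; infer_instance

-- ===== CLAIM (what is proved, stated in full; the proofs are below) =====
def Claim_equal_find_string_end_py : Prop := ∀ (s : String) (start : Int), Dom_find_string_end_py s start → Pre_find_string_end_py s start → Spec_find_string_end_py s start (find_string_end_py s start)

-- ===== LEMMAS AND PROOFS =====

theorem singleton_prefix_iff (a : Char) (l : List Char) : [a] <+: l ↔ l.head? = some a := by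
  cases l with
  | nil => simp
  | cons b t => simp [List.cons_prefix_cons, eq_comm]

theorem singleton_infix_iff (a : Char) (l : List Char) : [a] <:+: l ↔ a ∈ l := by
  constructor
  · rintro ⟨p, q, rfl⟩; simp
  · intro h
    obtain ⟨p, q, rfl⟩ := List.append_of_mem h
    exact ⟨p, q, by simp⟩

theorem drop_head (cs : List Char) (k : Nat) (hk : k < cs.length) :
    (cs.drop k).head? = some cs[k] := by
  rw [List.head?_drop]
  simp [hk]

-- hit: find at k returns k when cs[k] is the needle
theorem findFrom_hit (cs : List Char) (c : Char) (k : Nat) (hk : k < cs.length)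
    (hc : cs[k] = c) : PySem.Chars.findFrom cs [c] (k : Int) = k := by
  have hne : PySem.Chars.findFrom cs [c] (k : Int) ≠ -1 := by
    rw [Ne, PySem.Chars.findFrom_natCast_eq_neg_one_iff cs [c] k (le_of_lt hk)]
    simp only [not_not, singleton_infix_iff]
    exact List.mem_of_mem_head? (by rw [drop_head cs k hk, hc]; simp)
  obtain ⟨h1, h2, h3⟩ := PySem.Chars.findFrom_natCast_spec cs [c] k (le_of_lt hk) hne
  by_contra hne2
  have hlt : k < (PySem.Chars.findFrom cs [c] (k : Int)).toNat := by omega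
  exact h3 k le_rfl hlt (by rw [singleton_prefix_iff, drop_head cs k hk, hc])

-- miss: find at k equals find at k+1 when cs[k] is not the needle
theorem findFrom_miss (cs : List Char) (c : Char) (k : Nat) (hk : k < cs.length)
    (hc : cs[k] ≠ c) :
    PySem.Chars.findFrom cs [c] (k : Int) = PySem.Chars.findFrom cs [c] ((k : Int) + 1) := by
  have hk1 : k + 1 ≤ cs.length := hk
  have hcast : ((k : Int) + 1) = ((k + 1 : Nat) : Int) := by push_cast; ring
  rw [hcast]
  have hdropk : List.drop k cs = cs[k] :: List.drop (k + 1) cs := List.drop_eq_getElem_cons hk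
  have hmem : c ∈ List.drop k cs ↔ c ∈ List.drop (k + 1) cs := by
    constructor
    · intro h
      rw [hdropk] at h
      rcases List.mem_cons.mp h with h2 | h2
      · exact absurd h2.symm hc
      · exact h2
    · intro h
      rw [hdropk]
      exact List.mem_cons_of_mem _ h
  by_cases h1 : PySem.Chars.findFrom cs [c] ((k + 1 : Nat) : Int) = -1
  · rw [h1]
    rw [PySem.Chars.findFrom_natCast_eq_neg_one_iff cs [c] k (le_of_lt hk)]
    rw [PySem.Chars.findFrom_natCast_eq_neg_one_iff cs [c] (k+1) hk1] at h1
    rw [singleton_infix_iff] at h1 ⊢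
    rw [hmem]
    exact h1
  · obtain ⟨g1, g2, g3⟩ := PySem.Chars.findFrom_natCast_spec cs [c] (k+1) hk1 h1
    set j := PySem.Chars.findFrom cs [c] ((k + 1 : Nat) : Int) with hj
    have hjk : (k : Int) + 1 ≤ j := by push_cast at g1; omega
    have hcj : c ∈ List.drop j.toNat cs := by
      rcases g2 with ⟨t, ht⟩
      rw [← ht]; simp
    have hne : PySem.Chars.findFrom cs [c] (k : Int) ≠ -1 := by
      rw [Ne, PySem.Chars.findFrom_natCast_eq_neg_one_iff cs [c] k (le_of_lt hk)]
      simp only [not_not, singleton_infix_iff]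
      have hd : c ∈ List.drop (j.toNat - k) (List.drop k cs) := by
        rw [List.drop_drop]
        have he : k + (j.toNat - k) = j.toNat := by omega
        rw [he]; exact hcj
      exact List.mem_of_mem_drop hd
    obtain ⟨f1, f2, f3⟩ := PySem.Chars.findFrom_natCast_spec cs [c] k (le_of_lt hk) hne
    set m := PySem.Chars.findFrom cs [c] (k : Int) with hm
    have hmk : m.toNat ≠ k := by
      intro he
      rw [singleton_prefix_iff, he, drop_head cs k hk] at f2
      exact hc (by injection f2)
    have hmge : k + 1 ≤ m.toNat := by omega
    have h1' : ¬ m.toNat < j.toNat := fun hlt => g3 m.toNat hmge hlt f2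
    have h2' : ¬ j.toNat < m.toNat := fun hlt => f3 j.toNat (by omega) hlt g2
    omega

theorem getElem_pyGet (cs : List Char) (k : Nat) (hk : k < cs.length) :
    PySem.List.pyGet? cs (k : Int) = some cs[k] := by
  rw [PySem.List.pyGet?_natCast]
  exact List.getElem?_eq_getElem hk

-- one step of the A loop at an in-range position
theorem goA_step (cs : List Char) (k : Nat) (hk : k < cs.length) :
    findStringEndGo cs (k : Int) =
      (if cs[k] = '"' then (k : Int) + 1
       else if cs[k] = '\\' then findStringEndGo cs ((k : Int) + 2)
       else findStringEndGo cs ((k : Int) + 1)) := by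
  have hki : (k : Int) < (cs.length : Int) := by exact_mod_cast hk
  rw [findStringEndGo, dif_pos hki, getElem_pyGet cs k hk]

-- one step of the B loop at an in-range position (zeta-reduced form)
theorem altGo_unfold (cs : List Char) (n i : Int) (h : i < n) :
    findStringEndAltGo cs n i =
      (if _hcond : PySem.Chars.findFrom cs ['\\'] i ≠ -1 ∧ (PySem.Chars.findFrom cs ['"'] i = -1 ∨ PySem.Chars.findFrom cs ['\\'] i < PySem.Chars.findFrom cs ['"'] i)
       then findStringEndAltGo cs n (PySem.Chars.findFrom cs ['\\'] i + 2)
       else if PySem.Chars.findFrom cs ['"'] i = -1 then n + 1 else PySem.Chars.findFrom cs ['"'] i + 1) := by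
  rw [findStringEndAltGo, dif_pos h]

theorem findFrom_at_len (cs : List Char) (c : Char) (k : Nat) (hlen : k = cs.length) :
    PySem.Chars.findFrom cs [c] (k : Int) = -1 := by
  rw [PySem.Chars.findFrom_natCast_eq_neg_one_iff cs [c] k hlen.le, hlen]
  simp

-- one step of the B loop equals one step of the A loop
theorem altGo_step (cs : List Char) (k : Nat) (hk : k < cs.length) :
    findStringEndAltGo cs cs.length (k : Int) =
      (if cs[k] = '"' then (k : Int) + 1
       else if cs[k] = '\\' then findStringEndAltGo cs cs.length ((k : Int) + 2)
       else findStringEndAltGo cs cs.length ((k : Int) + 1)) := by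
  have hki : (k : Int) < (cs.length : Int) := by exact_mod_cast hk
  rw [altGo_unfold cs cs.length (k : Int) hki]
  by_cases hq : cs[k] = '"'
  · have hQ : PySem.Chars.findFrom cs ['"'] (k : Int) = k := findFrom_hit cs '"' k hk hq
    rw [if_pos hq, hQ]
    rw [dif_neg]
    · rw [if_neg (by omega : ¬ ((k : Int) = -1))]
    · rintro ⟨hb1, hb2 | hb3⟩
      · omega
      · exact absurd hb3 (not_lt.mpr ((PySem.Chars.findFrom_natCast_spec cs ['\\'] k hk.le hb1).1))
  · by_cases hbq : cs[k] = '\\'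
    · have hB : PySem.Chars.findFrom cs ['\\'] (k : Int) = k := findFrom_hit cs '\\' k hk hbq
      rw [if_neg hq, if_pos hbq, hB]
      rw [dif_pos]
      refine ⟨by omega, ?_⟩
      by_cases hq1 : PySem.Chars.findFrom cs ['"'] (k : Int) = -1
      · exact Or.inl hq1
      · right
        obtain ⟨s1, s2, s3⟩ := PySem.Chars.findFrom_natCast_spec cs ['"'] k hk.le hq1
        have hne : (PySem.Chars.findFrom cs ['"'] (k : Int)).toNat ≠ k := by
          intro he
          rw [singleton_prefix_iff, he, drop_head cs k hk] at s2
          exact hq (by injection s2)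
        omega
    · rw [if_neg hq, if_neg hbq]
      have hQ := findFrom_miss cs '"' k hk hq
      have hB := findFrom_miss cs '\\' k hk hbq
      rw [hQ, hB]
      by_cases hk1 : (k : Int) + 1 < (cs.length : Int)
      · rw [altGo_unfold cs cs.length ((k : Int) + 1) hk1]
      · have hlen : k + 1 = cs.length := by omega
        have hq1 : PySem.Chars.findFrom cs ['"'] ((k : Int) + 1) = -1 := by
          have h := findFrom_at_len cs '"' (k + 1) hlen
          push_cast at h
          exact h
        have hb1 : PySem.Chars.findFrom cs ['\\'] ((k : Int) + 1) = -1 := by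
          have h := findFrom_at_len cs '\\' (k + 1) hlen
          push_cast at h
          exact h
        rw [hq1, hb1]
        rw [dif_neg (by simp), if_pos rfl]
        conv_rhs => rw [findStringEndAltGo]
        rw [dif_neg (by omega : ¬ ((k : Int) + 1 < (cs.length : Int)))]
        omega

-- main equivalence on nonnegative scan positions
theorem main_equiv (cs : List Char) (k : Nat) :
    findStringEndGo cs (k : Int) = findStringEndAltGo cs cs.length (k : Int) := by
  have H : ∀ (d k : Nat), cs.length - k ≤ d →
      findStringEndGo cs (k : Int) = findStringEndAltGo cs cs.length (k : Int) := by
    intro d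
    induction d with
    | zero =>
      intro k hd
      have hk : ¬ ((k : Int) < (cs.length : Int)) := by omega
      rw [findStringEndGo, dif_neg hk, findStringEndAltGo, dif_neg hk]
    | succ d IH =>
      intro k hd
      by_cases hk : k < cs.length
      · rw [goA_step cs k hk, altGo_step cs k hk]
        have h2 : ((k : Int) + 2) = ((k + 2 : Nat) : Int) := by push_cast; ring
        have h1 : ((k : Int) + 1) = ((k + 1 : Nat) : Int) := by push_cast; ring
        split_ifs with hc1 hc2
        · rfl
        · rw [h2]; exact IH (k + 2) (by omega)
        · rw [h1]; exact IH (k + 1) (by omega)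
      · have hki : ¬ ((k : Int) < (cs.length : Int)) := by omega
        rw [findStringEndGo, dif_neg hki, findStringEndAltGo, dif_neg hki]
  exact H cs.length k (by omega)

theorem find_string_end_py_spec : Claim_equal_find_string_end_py := by
  intro s start _hdom hpre
  unfold Spec_find_string_end_py find_string_end_py find_string_end_py_alt
  have h0 : (0:Int) ≤ start + 1 := by
    unfold Pre_find_string_end_py at hpre; omega
  obtain ⟨k, hk⟩ : ∃ k : Nat, start + 1 = (k : Int) := ⟨(start+1).toNat, by omega⟩
  rw [hk]
  exact main_equiv s.toList k
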